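-- pv_equiv track=rewrite | github.com/hellokena/2022 | DFS & BFS/re/lv1/오픈채팅방.py | solution
-- ===== SOURCE A (Python) =====
-- from collections import defaultdict
--
-- def solution(record):
--     people = defaultdict(str)
--     for rec in record:
--         now_rec = rec.split()
--         if now_rec[0] == 'Enter':
--             people[now_rec[1]] = now_rec[2]
--         #elif now_rec[0] == 'Leave':
--             #del(people[now_rec[1]])
--         elif now_rec[0] == 'Change':
--             people[now_rec[1]] = now_rec[2] # 치환
--     answer = []
--     for rec in record:
--         now_rec = rec.split()
--         if now_rec[0] == 'Enter':
--             answer.append(people[now_rec[1]] + '님이 들어왔습니다.')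
--         elif now_rec[0] == 'Leave':
--             answer.append(people[now_rec[1]] + '님이 나갔습니다.')
--     return answer
-- ===== SOURCE B (Python) =====
-- def solution(record):
--     # No name map at all: the final name of a uid is whatever the LAST
--     # 'Enter uid name' / 'Change uid name' line in the log says, so look it
--     # up by scanning the log backwards on demand.
--     def final_name(uid):
--         for rec in reversed(record):
--             t = rec.split()
--             if (t[0] == 'Enter' or t[0] == 'Change') and t[1] == uid:
--                 return t[2]
--         return ''
--     answer = []
--     for rec in record:
--         t = rec.split()
--         if t[0] == 'Enter':
--             answer.append(final_name(t[1]) + '님이 들어왔습니다.')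
--         elif t[0] == 'Leave':
--             answer.append(final_name(t[1]) + '님이 나갔습니다.')
--     return answer
-- ===== Notes on version B (the rewrite author's own statement) =====
-- stated objective: alternative
-- what changed: B drops A's name dictionary entirely: instead of a first pass building a uid->name map, B resolves each Enter/Leave line's display name on demand by a backward linear scan for the last 'Enter/Change uid name' line (last assignment wins), trading A's two map-building passes for a map-free nested search.
import Mathlib
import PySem

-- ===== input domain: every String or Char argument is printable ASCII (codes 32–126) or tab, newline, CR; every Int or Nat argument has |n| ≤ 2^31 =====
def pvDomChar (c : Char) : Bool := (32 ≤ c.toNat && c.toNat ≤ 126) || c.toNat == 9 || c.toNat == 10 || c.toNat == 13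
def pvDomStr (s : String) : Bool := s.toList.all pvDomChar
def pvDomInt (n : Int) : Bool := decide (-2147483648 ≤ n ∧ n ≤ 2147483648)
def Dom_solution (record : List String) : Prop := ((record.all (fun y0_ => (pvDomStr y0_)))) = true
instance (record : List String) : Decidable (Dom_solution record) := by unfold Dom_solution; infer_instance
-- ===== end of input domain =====

-- B removes A's name dictionary: each Enter/Leave line resolves its display name by a backward
-- linear scan for the last 'Enter/Change uid name' line (alternative decomposition, not faster).

-- ===== PORT A =====
-- first pass of A: build the uid -> final-name dict (defaultdict only written here, so a plain Dict)
def aStep (d : PySem.Dict String String) (rec : String) : PySem.Dict String String :=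
  let ts := PySem.Str.split₀ rec
  if ts.getD 0 "" = "Enter" then d.insert (ts.getD 1 "") (ts.getD 2 "")
  else if ts.getD 0 "" = "Change" then d.insert (ts.getD 1 "") (ts.getD 2 "")
  else d

-- second pass of A: defaultdict read people[uid] returns the stored name or '' (exact under Pre_;
-- the implicit '' insertion the defaultdict performs cannot affect any later read of this dict)
def aOut (people : PySem.Dict String String) (acc : List String) (rec : String) : List String :=
  let ts := PySem.Str.split₀ rec
  if ts.getD 0 "" = "Enter" then acc ++ [people.getD (ts.getD 1 "") "" ++ "님이 들어왔습니다."]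
  else if ts.getD 0 "" = "Leave" then acc ++ [people.getD (ts.getD 1 "") "" ++ "님이 나갔습니다."]
  else acc

def solution (record : List String) : List String :=
  let people := record.foldl aStep PySem.Dict.empty
  record.foldl (aOut people) []

-- ===== PORT B =====
-- does this line read 'Enter uid name' or 'Change uid name' for this uid?
def setsName (uid : String) (rec : String) : Bool :=
  let ts := PySem.Str.split₀ rec
  ((ts.getD 0 "" == "Enter" || ts.getD 0 "" == "Change") && ts.getD 1 "" == uid)

-- B's final_name: scan a list of records (the reversed log) for the first Enter/Change line
-- naming uid, return its third token; '' if no line names uid.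
def finalName (l : List String) (uid : String) : String :=
  match l with
  | [] => ""
  | r :: rs => if setsName uid r then (PySem.Str.split₀ r).getD 2 "" else finalName rs uid

def bOut (record : List String) (acc : List String) (rec : String) : List String :=
  let ts := PySem.Str.split₀ rec
  if ts.getD 0 "" = "Enter" then acc ++ [finalName record.reverse (ts.getD 1 "") ++ "님이 들어왔습니다."]
  else if ts.getD 0 "" = "Leave" then acc ++ [finalName record.reverse (ts.getD 1 "") ++ "님이 나갔습니다."]
  else acc

def solution_alt (record : List String) : List String :=
  record.foldl (bOut record) []

-- ===== PRECONDITION & SPEC =====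
-- Pre_ excludes exactly the records on which Python A raises IndexError: a whitespace-only line
-- (now_rec[0]), or an 'Enter'/'Change' line with fewer than 3 tokens, or a 'Leave' line with
-- fewer than 2 tokens.
def Pre_solution (record : List String) : Prop :=
  ∀ rec ∈ record,
    PySem.Str.split₀ rec ≠ [] ∧
    (((PySem.Str.split₀ rec).getD 0 "" = "Enter" ∨ (PySem.Str.split₀ rec).getD 0 "" = "Change") →
      3 ≤ (PySem.Str.split₀ rec).length) ∧
    ((PySem.Str.split₀ rec).getD 0 "" = "Leave" → 2 ≤ (PySem.Str.split₀ rec).length)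
instance (record : List String) : Decidable (Pre_solution record) := by
  unfold Pre_solution; infer_instance

def pvWitness_solution : List String :=
  ["Enter u1 Muzi", "Enter u2 Con", "Leave u1", "Change u2 Ryan"]

def Spec_solution (record : List String) (out : List String) : Prop := out = solution_alt record
instance (record : List String) (out : List String) : Decidable (Spec_solution record out) := by
  unfold Spec_solution; infer_instance

-- ===== CLAIM (what is proved, stated in full; the proofs are below) =====
def Claim_equal_solution : Prop :=
  ∀ (record : List String), Dom_solution record → Pre_solution record →
    Spec_solution record (solution record)

-- ===== LEMMAS AND PROOFS =====

theorem setsName_eq_true (uid x : String) :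
    setsName uid x = true ↔
      (((PySem.Str.split₀ x).getD 0 "" = "Enter" ∨ (PySem.Str.split₀ x).getD 0 "" = "Change") ∧
        (PySem.Str.split₀ x).getD 1 "" = uid) := by
  simp [setsName]

theorem finalName_append (a b : List String) (uid : String) :
    finalName (a ++ b) uid =
      if ∃ r ∈ a, setsName uid r then finalName a uid else finalName b uid := by
  induction a with
  | nil => simp
  | cons x xs ih =>
    simp only [List.cons_append, finalName]
    by_cases hx : setsName uid x
    · rw [if_pos hx, if_pos ⟨x, List.mem_cons_self, hx⟩, if_pos hx]
    · rw [if_neg hx, ih]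
      by_cases hxs : ∃ r ∈ xs, setsName uid r
      · obtain ⟨r, hr, hs⟩ := hxs
        rw [if_pos ⟨r, hr, hs⟩, if_pos ⟨r, List.mem_cons_of_mem _ hr, hs⟩, if_neg hx]
      · rw [if_neg hxs, if_neg (by
          rintro ⟨r, hr, hs⟩
          rcases List.mem_cons.mp hr with rfl | hr
          · exact hx hs
          · exact hxs ⟨r, hr, hs⟩)]

theorem finalName_of_not_sets (l : List String) (uid : String)
    (h : ∀ r ∈ l, ¬ setsName uid r) : finalName l uid = "" := by
  induction l with
  | nil => rfl
  | cons x xs ih =>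
    simp only [finalName]
    rw [if_neg (h x List.mem_cons_self)]
    exact ih (fun r hr => h r (List.mem_cons_of_mem _ hr))

-- the dict A builds reads back exactly B's backward search
theorem foldl_aStep_getD (l : List String) (d : PySem.Dict String String) (uid : String) :
    (l.foldl aStep d).getD uid "" =
      if ∃ r ∈ l, setsName uid r then finalName l.reverse uid else d.getD uid "" := by
  induction l generalizing d with
  | nil => simp
  | cons x xs ih =>
    simp only [List.foldl_cons, List.reverse_cons]
    rw [ih, finalName_append]
    by_cases hxs : ∃ r ∈ xs, setsName uid r
    · have hrev : ∃ r ∈ xs.reverse, setsName uid r := by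
        obtain ⟨r, hr, hs⟩ := hxs; exact ⟨r, List.mem_reverse.mpr hr, hs⟩
      have hex : ∃ r ∈ x :: xs, setsName uid r := by
        obtain ⟨r, hr, hs⟩ := hxs; exact ⟨r, List.mem_cons_of_mem _ hr, hs⟩
      rw [if_pos hxs, if_pos hrev, if_pos hex]
    · have hrev : ¬ ∃ r ∈ xs.reverse, setsName uid r := by
        rintro ⟨r, hr, hs⟩; exact hxs ⟨r, List.mem_reverse.mp hr, hs⟩
      rw [if_neg hxs, if_neg hrev]
      by_cases hx : setsName uid x
      · rw [if_pos ⟨x, List.mem_cons_self, hx⟩]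
        obtain ⟨h0, h1⟩ := (setsName_eq_true uid x).mp hx
        simp only [finalName]
        rw [if_pos hx]
        by_cases hE : (PySem.Str.split₀ x).getD 0 "" = "Enter"
        · simp only [aStep]
          rw [if_pos hE, ← h1, PySem.Dict.getD_insert_self]
        · have hC : (PySem.Str.split₀ x).getD 0 "" = "Change" := h0.resolve_left hE
          simp only [aStep]
          rw [if_neg hE, if_pos hC, ← h1, PySem.Dict.getD_insert_self]
      · rw [if_neg (by
          rintro ⟨r, hr, hs⟩
          rcases List.mem_cons.mp hr with rfl | hr
          · exact hx hs
          · exact hxs ⟨r, hr, hs⟩)]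
        simp only [aStep]
        by_cases hE : (PySem.Str.split₀ x).getD 0 "" = "Enter"
        · have hne : ¬ ((PySem.Str.split₀ x).getD 1 "" = uid) := fun h => hx ((setsName_eq_true uid x).mpr ⟨Or.inl hE, h⟩)
          rw [if_pos hE, PySem.Dict.getD_insert, if_neg (fun h => hne h.symm)]
        · by_cases hC : (PySem.Str.split₀ x).getD 0 "" = "Change"
          · have hne : ¬ ((PySem.Str.split₀ x).getD 1 "" = uid) := fun h => hx ((setsName_eq_true uid x).mpr ⟨Or.inr hC, h⟩)
            rw [if_neg hE, if_pos hC, PySem.Dict.getD_insert, if_neg (fun h => hne h.symm)]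
          · rw [if_neg hE, if_neg hC]

theorem people_getD (record : List String) (uid : String) :
    (record.foldl aStep PySem.Dict.empty).getD uid "" = finalName record.reverse uid := by
  rw [foldl_aStep_getD]
  split_ifs with h
  · rfl
  · rw [finalName_of_not_sets _ _ (fun r hr hs => h ⟨r, List.mem_reverse.mp hr, hs⟩)]
    rfl

theorem out_eq (record l acc : List String) :
    l.foldl (aOut (record.foldl aStep PySem.Dict.empty)) acc = l.foldl (bOut record) acc := by
  induction l generalizing acc with
  | nil => rfl
  | cons x xs ih =>
    simp only [List.foldl_cons]
    have hstep : aOut (record.foldl aStep PySem.Dict.empty) acc x = bOut record acc x := by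
      simp only [aOut, bOut, people_getD]
    rw [hstep, ih]

-- ===== VERDICT (by name: the statement is the Claim_ definition above) =====
theorem solution_spec : Claim_equal_solution := by
  intro record _ _
  unfold Spec_solution solution solution_alt
  exact out_eq record record []
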